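-- pv_equiv track=rewrite | github.com/sp8cky/Primes | src/primality/helpers.py | find_proth_decomposition
-- ===== SOURCE A (Python) =====
-- def find_proth_decomposition(n: int) -> tuple[int, int] | None:
--     if n <= 2 or n % 2 == 0:
--         return None
--
--     m = n - 1
--     e = 0
--     while m % 2 == 0:
--         m //= 2
--         e += 1
--     K = m
--     if K % 2 == 1:
--         return (K, e)
--     return None
-- ===== SOURCE B (Python) =====
-- def find_proth_decomposition(n: int) -> tuple[int, int] | None:
--     if n <= 2 or n % 2 == 0:
--         return None
--     m = n - 1
--     e = (m & -m).bit_length() - 1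
--     return (m >> e, e)
-- ===== Notes on version B (the rewrite author's own statement) =====
-- stated objective: idiomatic
-- what changed: The trailing-zero-stripping while loop is replaced by a closed-form bit trick: (m & -m).bit_length() - 1 gives the exponent and m >> e the odd part, with no loop and no redundant parity re-check on K (K is always odd for odd n > 2).
import Mathlib
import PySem

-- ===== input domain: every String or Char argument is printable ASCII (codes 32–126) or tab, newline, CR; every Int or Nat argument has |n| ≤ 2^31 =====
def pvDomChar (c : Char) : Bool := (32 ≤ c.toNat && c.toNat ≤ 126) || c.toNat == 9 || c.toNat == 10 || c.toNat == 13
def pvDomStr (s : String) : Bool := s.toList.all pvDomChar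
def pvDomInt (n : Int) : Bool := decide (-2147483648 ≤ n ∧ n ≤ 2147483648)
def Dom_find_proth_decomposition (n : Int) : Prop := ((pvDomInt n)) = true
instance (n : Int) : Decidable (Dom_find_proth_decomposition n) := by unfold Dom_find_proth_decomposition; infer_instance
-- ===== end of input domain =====

-- B replaces A's twos-stripping while loop by the closed-form bit trick e = (m & -m).bit_length() - 1, K = m >> e (idiomatic, loop-free).

-- ===== PORT A =====
-- 'while m % 2 == 0: m //= 2; e += 1' — the 'm ≠ 0' conjunct is a termination guard only:
-- Python's loop diverges at m = 0, which is never reached (m = n - 1 ≥ 2 at the call site).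
def pvStripA (m : Int) (e : Int) : Int × Int :=
  if h : PySem.Int.mod m 2 = 0 ∧ m ≠ 0 then
    pvStripA (PySem.Int.floordiv m 2) (e + 1)
  else (m, e)
termination_by m.natAbs
decreasing_by
  obtain ⟨h2, h0⟩ := h
  obtain ⟨k, hk⟩ := (PySem.Int.mod_eq_zero_iff_dvd m 2).mp h2
  subst hk
  have : PySem.Int.floordiv (2 * k) 2 = k := Int.mul_fdiv_cancel_left k (by norm_num)
  rw [this]
  have : (2 * k).natAbs = 2 * k.natAbs := by simp [Int.natAbs_mul]
  omega

def find_proth_decomposition (n : Int) : Option (Int × Int) :=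
  if n ≤ 2 ∨ PySem.Int.mod n 2 = 0 then none
  else
    let r := pvStripA (n - 1) 0
    let K := r.1
    let e := r.2
    if PySem.Int.mod K 2 = 1 then some (K, e) else none

-- ===== PORT B =====
def find_proth_decomposition_alt (n : Int) : Option (Int × Int) :=
  if n ≤ 2 ∨ PySem.Int.mod n 2 = 0 then none
  else
    let m := n - 1
    -- e = (m & -m).bit_length() - 1
    let e : Nat := PySem.Int.bitLength (PySem.Int.band m (-m)) - 1
    some (m >>> e, (e : Int))

-- ===== PRECONDITION & SPEC =====
def Spec_find_proth_decomposition (n : Int) (out : Option (Int × Int)) : Prop := out = find_proth_decomposition_alt n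
instance (n : Int) (out : Option (Int × Int)) : Decidable (Spec_find_proth_decomposition n out) := by unfold Spec_find_proth_decomposition; infer_instance

-- ===== CLAIM (what is proved, stated in full; the proofs are below) =====
def Claim_equal_find_proth_decomposition : Prop := ∀ (n : Int), Dom_find_proth_decomposition n → Spec_find_proth_decomposition n (find_proth_decomposition n)

-- ===== LEMMAS AND PROOFS =====

-- proof-side helper: the number of trailing zero bits of M (= A's loop counter e)
def pvTz (M : Nat) : Nat :=
  if h : M % 2 = 0 ∧ M ≠ 0 then pvTz (M / 2) + 1 else 0
termination_by M
decreasing_by omega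

lemma pvMod_natCast (M : Nat) : PySem.Int.mod (↑M) 2 = ↑(M % 2) := by
  show Int.fmod (↑M) 2 = ↑(M % 2)
  exact_mod_cast (Int.ofNat_fmod M 2).symm

-- one strong induction carrying everything both ports need about M > 0:
-- (a) M &&& (M-1) clears the lowest set bit, (b) 2^tz divides below M,
-- (c) the stripped part is odd, (d) A's loop computes exactly (M / 2^tz, e + tz).
lemma pvMain : ∀ M : Nat, 0 < M →
    (M &&& (M - 1) = M - 2 ^ pvTz M) ∧ (2 ^ pvTz M ≤ M) ∧ ((M / 2 ^ pvTz M) % 2 = 1) ∧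
    (∀ e : Int, pvStripA (↑M) e = (↑(M / 2 ^ pvTz M), e + ↑(pvTz M))) := by
  intro M
  induction M using Nat.strong_induction_on with
  | _ M IH =>
    intro hM
    by_cases hpar : M % 2 = 0
    · -- even case: M = 2k
      set k := M / 2 with hk
      have hMk : M = 2 * k := by omega
      have hkpos : 0 < k := by omega
      obtain ⟨ia, ib, ic, id⟩ := IH k (by omega) hkpos
      have htz : pvTz M = pvTz k + 1 := by rw [pvTz]; simp [hpar, hk]; omega
      have hbit : M &&& (M - 1) = M - 2 ^ pvTz M := by
        have h1 : M = Nat.bit false k := by simp [Nat.bit_val]; omega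
        have h2 : M - 1 = Nat.bit true (k - 1) := by simp [Nat.bit_val]; omega
        have key : M &&& (M - 1) = 2 * (k &&& (k - 1)) := by
          conv_lhs => rw [h2, h1]
          rw [Nat.land_bit, Nat.bit_val]
          simp
        rw [key, ia, htz, pow_succ]
        omega
      refine ⟨hbit, ?_, ?_, ?_⟩
      · rw [htz, pow_succ]; omega
      · rw [htz, pow_succ, hMk, Nat.mul_comm (2 ^ pvTz k) 2, ← Nat.div_div_eq_div_mul,
          Nat.mul_div_cancel_left k (by norm_num)]
        exact ic
      · intro e
        rw [pvStripA]
        have hcond : PySem.Int.mod (↑M) 2 = 0 ∧ (↑M : Int) ≠ 0 := by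
          constructor
          · rw [pvMod_natCast, hpar]; simp
          · exact_mod_cast Nat.pos_iff_ne_zero.mp hM
        rw [dif_pos hcond]
        have hfd : PySem.Int.floordiv (↑M) 2 = ↑k := by
          have h := PySem.Int.floordiv_natCast M 2
          rw [hk]; exact_mod_cast h
        rw [hfd, id (e + 1), htz, Prod.mk.injEq]
        refine ⟨?_, by push_cast; ring⟩
        congr 1
        rw [pow_succ, hMk, Nat.mul_comm (2 ^ pvTz k) 2, ← Nat.div_div_eq_div_mul,
          Nat.mul_div_cancel_left k (by norm_num)]
    · -- odd case: M = 2a + 1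
      have hpar1 : M % 2 = 1 := by omega
      have htz : pvTz M = 0 := by rw [pvTz]; simp [hpar]
      set a := M / 2 with ha
      have hbit : M &&& (M - 1) = M - 2 ^ pvTz M := by
        have h1 : M = Nat.bit true a := by simp [Nat.bit_val]; omega
        have h2 : M - 1 = Nat.bit false a := by simp [Nat.bit_val]; omega
        have key : M &&& (M - 1) = 2 * a := by
          conv_lhs => rw [h2, h1]
          rw [Nat.land_bit, Nat.and_self, Nat.bit_val]
          simp
        rw [key, htz, pow_zero]
        omega
      refine ⟨hbit, by rw [htz]; simpa using hM, by simpa [htz] using hpar1, ?_⟩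
      intro e
      rw [pvStripA]
      have hcond : ¬ (PySem.Int.mod (↑M) 2 = 0 ∧ (↑M : Int) ≠ 0) := by
        rw [pvMod_natCast, hpar1]; simp
      rw [dif_neg hcond, htz]
      simp

-- bit_length of a power of two
lemma pvBitLength_pow (t : Nat) : PySem.Int.bitLength ((2 ^ t : Nat) : Int) = t + 1 := by
  have h1 := PySem.Int.two_pow_bitLength_le ((2 ^ t : Nat) : Int) (by positivity)
  have h2 := PySem.Int.lt_two_pow_bitLength ((2 ^ t : Nat) : Int)
  simp at h1 h2
  set b := PySem.Int.bitLength ((2 ^ t : Nat) : Int)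
  have hb1 : b - 1 ≤ t := (Nat.pow_le_pow_iff_right (by omega)).mp h1
  have hb2 : t < b := (Nat.pow_lt_pow_iff_right (by omega)).mp h2
  omega

-- m & -m isolates the lowest set bit of a positive m
lemma pvBand_neg (M : Nat) (h : 0 < M) : PySem.Int.band (↑M) (-↑M) = ((2 ^ pvTz M : Nat) : Int) := by
  obtain ⟨ia, ib, -, -⟩ := pvMain M h
  have hpos : ¬ (0 ≤ (-↑M : Int)) := by omega
  unfold PySem.Int.band
  rw [if_pos (by positivity), if_neg hpos]
  have h1 : ((↑M : Int)).toNat = M := Int.toNat_natCast M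
  have h2 : (-(-↑M : Int) - 1).toNat = M - 1 := by omega
  rw [h1, h2, ia, Nat.sub_sub_self ib]

-- ===== VERDICT (by name: the statement is the Claim_ definition above) =====
theorem find_proth_decomposition_spec : Claim_equal_find_proth_decomposition := by
  intro n _
  unfold Spec_find_proth_decomposition find_proth_decomposition find_proth_decomposition_alt
  by_cases hg : n ≤ 2 ∨ PySem.Int.mod n 2 = 0
  · rw [if_pos hg, if_pos hg]
  · rw [if_neg hg, if_neg hg]
    push Not at hg
    obtain ⟨hn2, _⟩ := hg
    set M := (n - 1).toNat with hMdef
    have hMcast : ((M : Int)) = n - 1 := Int.toNat_of_nonneg (by omega)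
    have hMpos : 0 < M := by omega
    obtain ⟨-, hb, hc, hd⟩ := pvMain M hMpos
    set t := pvTz M with ht
    -- A's side
    have hA : pvStripA (n - 1) 0 = (↑(M / 2 ^ t), (t : Int)) := by
      rw [← hMcast, hd 0]; simp
    have hKodd : PySem.Int.mod (↑(M / 2 ^ t)) 2 = 1 := by
      rw [pvMod_natCast, hc]; simp
    -- B's side
    have hBand : PySem.Int.band (n - 1) (-(n - 1)) = ((2 ^ t : Nat) : Int) := by
      rw [← hMcast]; exact pvBand_neg M hMpos
    have hE : PySem.Int.bitLength (PySem.Int.band (n - 1) (-(n - 1))) - 1 = t := by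
      rw [hBand, pvBitLength_pow]; omega
    have hShift : (n - 1) >>> t = (↑(M / 2 ^ t) : Int) := by
      rw [← hMcast]
      rw [show ((↑M : Int) >>> t) = ↑(M >>> t) from rfl, Nat.shiftRight_eq_div_pow]
    simp only [hA, hE, hKodd, if_pos]
    rw [hShift]
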